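-- pv_equiv track=rewrite | github.com/felipeaguiardecarvalho-afk/ALIEH-MANAGEMENT | database/sql_compat.py | qmarks_to_percent_s
-- ===== SOURCE A (Python) =====
-- def qmarks_to_percent_s(sql: str) -> str:
--     """Troca ``?`` por ``%s`` fora de literais entre aspas simples."""
--     out: list[str] = []
--     i = 0
--     n = len(sql)
--     in_single = False
--     while i < n:
--         c = sql[i]
--         if c == "'" and not in_single:
--             in_single = True
--             out.append(c)
--             i += 1
--             continue
--         if in_single:
--             if c == "'":
--                 if i + 1 < n and sql[i + 1] == "'":
--                     out.append("''")
--                     i += 2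
--                     continue
--                 in_single = False
--                 out.append(c)
--                 i += 1
--                 continue
--             out.append(c)
--             i += 1
--             continue
--         if c == "?":
--             out.append("%s")
--             i += 1
--             continue
--         out.append(c)
--         i += 1
--     return "".join(out)
-- ===== SOURCE B (Python) =====
-- import re
--
-- _TOKEN = re.compile(r"'(?:[^']|'')*'|'(?:[^']|'')*\Z|\?")
--
--
-- def qmarks_to_percent_s(sql: str) -> str:
--     """Troca ``?`` por ``%s`` fora de literais entre aspas simples."""
--     return _TOKEN.sub(lambda m: "%s" if m.group(0) == "?" else m.group(0), sql)
-- ===== Notes on version B (the rewrite author's own statement) =====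
-- stated objective: idiomatic
-- what changed: Replaces A's hand-written per-character index loop with an in_single state flag by a single re.sub over a compiled alternation (complete quoted literal | unterminated literal | bare '?') whose callback replaces only bare question marks.
import Mathlib
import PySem

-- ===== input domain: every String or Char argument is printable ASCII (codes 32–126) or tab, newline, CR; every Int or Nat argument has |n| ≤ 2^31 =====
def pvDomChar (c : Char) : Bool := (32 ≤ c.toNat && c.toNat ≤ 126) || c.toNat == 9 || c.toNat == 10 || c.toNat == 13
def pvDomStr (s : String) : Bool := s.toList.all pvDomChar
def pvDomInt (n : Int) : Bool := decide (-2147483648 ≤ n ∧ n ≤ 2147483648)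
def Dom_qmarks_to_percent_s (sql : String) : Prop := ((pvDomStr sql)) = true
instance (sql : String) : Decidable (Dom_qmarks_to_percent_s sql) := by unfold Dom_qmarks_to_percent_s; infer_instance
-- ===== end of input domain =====

-- B replaces A's hand-rolled index/state loop by a single regex-style tokenization pass
-- (complete literal | unterminated literal | '?'), which is shorter and more idiomatic.

-- ===== PORT A =====
-- A's while-loop over index i with the in_single flag, as structural recursion on the
-- character list; the `'\'' :: rest2` pattern is A's `sql[i+1] == "'"` lookahead.
def pvAGo : List Char → Bool → List Char
  | [], _ => []
  | c :: rest, ins =>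
    if c = '\'' && !ins then
      '\'' :: pvAGo rest true
    else if ins then
      if c = '\'' then
        match rest with
        | '\'' :: rest2 => '\'' :: '\'' :: pvAGo rest2 true
        | [] => '\'' :: pvAGo [] false
        | c2 :: rest2 => '\'' :: pvAGo (c2 :: rest2) false
      else c :: pvAGo rest true
    else if c = '?' then '%' :: 's' :: pvAGo rest false
    else c :: pvAGo rest false
termination_by l _ => l.length
decreasing_by all_goals (first | (simp; omega) | simp | omega)

def qmarks_to_percent_s (sql : String) : String :=
  String.ofList (pvAGo sql.toList false)

-- ===== PORT B =====
-- B's regex "'(?:[^']|'')*'" tokenizer: after an opening quote, consume the literal body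
-- (doubled quotes are escapes); `some (body ++ closing, rest)` on a complete literal,
-- `none` when the literal is unterminated (the regex's unterminated-to-end alternative).
def pvScanLit : List Char → Option (List Char × List Char)
  | [] => none
  | c :: r =>
    if c = '\'' then
      match r with
      | c2 :: r2 =>
        if c2 = '\'' then (pvScanLit r2).map (fun p => ('\'' :: '\'' :: p.1, p.2))
        else some (['\''], c2 :: r2)
      | [] => some (['\''], [])
    else (pvScanLit r).map (fun p => (c :: p.1, p.2))
termination_by l => l.length
decreasing_by all_goals (first | (simp; omega) | simp | omega)

-- equation lemmas for pvScanLit, one per branch (cited by the termination lemma below)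
theorem scan_qq (r2 : List Char) :
    pvScanLit ('\'' :: '\'' :: r2) = (pvScanLit r2).map (fun p => ('\'' :: '\'' :: p.1, p.2)) := by
  simp [pvScanLit]

theorem scan_q1 (c2 : Char) (r2 : List Char) (h : c2 ≠ '\'') :
    pvScanLit ('\'' :: c2 :: r2) = some (['\''], c2 :: r2) := by
  simp [pvScanLit, h]

theorem scan_q0 : pvScanLit ['\''] = some (['\''], []) := by
  simp [pvScanLit]

theorem scan_other (c : Char) (r : List Char) (h : c ≠ '\'') :
    pvScanLit (c :: r) = (pvScanLit r).map (fun p => (c :: p.1, p.2)) := by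
  rw [pvScanLit.eq_def]; simp [h]

-- needed by pvBGo's termination proof: the remainder after a complete literal is no longer
theorem pvScanLitAux : ∀ (n : Nat) (r b rest : List Char), r.length ≤ n →
    pvScanLit r = some (b, rest) → rest.length ≤ r.length := by
  intro n
  induction n with
  | zero =>
    intro r b rest hr h
    have : r = [] := List.eq_nil_of_length_eq_zero (Nat.le_zero.mp hr)
    subst this; simp [pvScanLit] at h
  | succ n ih =>
    intro r b rest hr h
    cases r with
    | nil => simp [pvScanLit] at h
    | cons c t =>
      by_cases hc : c = '\''
      · subst hc
        cases t with
        | nil =>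
          rw [scan_q0] at h
          simp at h
          simp [← h.2]
        | cons c2 r2 =>
          by_cases hc2 : c2 = '\''
          · subst hc2
            rw [scan_qq] at h
            cases hs : pvScanLit r2 with
            | none => rw [hs] at h; simp at h
            | some p =>
              rw [hs] at h; simp at h
              have hle := ih r2 p.1 p.2 (by simp at hr; omega) (by rw [hs])
              rw [← h.2]; simp; omega
          · rw [scan_q1 c2 r2 hc2] at h
            simp at h
            simp [← h.2]
      · rw [scan_other c t hc] at h
        cases hs : pvScanLit t with
        | none => rw [hs] at h; simp at h
        | some p =>
          rw [hs] at h; simp at h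
          have hle := ih t p.1 p.2 (by simp at hr; omega) (by rw [hs])
          rw [← h.2]; simp; omega

theorem pvScanLit_le (r b rest : List Char) (h : pvScanLit r = some (b, rest)) :
    rest.length ≤ r.length :=
  pvScanLitAux r.length r b rest (le_refl _) h

-- B's sub-with-callback scan: at each position match, in order, a quoted literal
-- (copied unchanged), a bare '?' (replaced by "%s"), or a plain character.
def pvBGo : List Char → List Char
  | [] => []
  | c :: r =>
    if c = '\'' then
      match h : pvScanLit r with
      | some (b, rest) => '\'' :: (b ++ pvBGo rest)
      | none => '\'' :: r
    else if c = '?' then '%' :: 's' :: pvBGo r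
    else c :: pvBGo r
termination_by l => l.length
decreasing_by
  · have := pvScanLit_le r b rest h; simp; omega
  · simp
  · simp

def qmarks_to_percent_s_alt (sql : String) : String :=
  String.ofList (pvBGo sql.toList)

-- ===== PRECONDITION & SPEC =====
def Spec_qmarks_to_percent_s (sql : String) (out : String) : Prop := out = qmarks_to_percent_s_alt sql
instance (sql : String) (out : String) : Decidable (Spec_qmarks_to_percent_s sql out) := by unfold Spec_qmarks_to_percent_s; infer_instance

-- ===== CLAIM (what is proved, stated in full; the proofs are below) =====
def Claim_equal_qmarks_to_percent_s : Prop := ∀ (sql : String), Dom_qmarks_to_percent_s sql → Spec_qmarks_to_percent_s sql (qmarks_to_percent_s sql)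

-- ===== LEMMAS AND PROOFS =====

-- equation lemmas for the two scanners, one per branch
theorem a_nil (ins : Bool) : pvAGo [] ins = [] := by simp [pvAGo]

theorem a_false_q (t : List Char) : pvAGo ('\'' :: t) false = '\'' :: pvAGo t true := by
  rw [pvAGo.eq_def]; simp

theorem a_true_qq (r2 : List Char) :
    pvAGo ('\'' :: '\'' :: r2) true = '\'' :: '\'' :: pvAGo r2 true := by
  simp [pvAGo]

theorem a_true_q1 (c2 : Char) (r2 : List Char) (h : c2 ≠ '\'') :
    pvAGo ('\'' :: c2 :: r2) true = '\'' :: pvAGo (c2 :: r2) false := by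
  simp [pvAGo, h]

theorem a_true_q0 : pvAGo ['\''] true = '\'' :: pvAGo [] false := by
  simp [pvAGo]

theorem a_true_other (c : Char) (t : List Char) (h : c ≠ '\'') :
    pvAGo (c :: t) true = c :: pvAGo t true := by
  rw [pvAGo.eq_def]; simp [h]

theorem a_false_qm (t : List Char) : pvAGo ('?' :: t) false = '%' :: 's' :: pvAGo t false := by
  rw [pvAGo.eq_def]; simp

theorem a_false_other (c : Char) (t : List Char) (hc : c ≠ '\'') (hq : c ≠ '?') :
    pvAGo (c :: t) false = c :: pvAGo t false := by
  rw [pvAGo.eq_def]; simp [hc, hq]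

theorem b_nil : pvBGo [] = [] := by simp [pvBGo]

theorem b_q_some (t b rest : List Char) (hs : pvScanLit t = some (b, rest)) :
    pvBGo ('\'' :: t) = '\'' :: (b ++ pvBGo rest) := by
  simp [pvBGo]
  split <;> simp_all

theorem b_q_none (t : List Char) (hs : pvScanLit t = none) :
    pvBGo ('\'' :: t) = '\'' :: t := by
  simp [pvBGo]
  split <;> simp_all

theorem b_qm (t : List Char) : pvBGo ('?' :: t) = '%' :: 's' :: pvBGo t := by
  simp [pvBGo]

theorem b_other (c : Char) (t : List Char) (hc : c ≠ '\'') (hq : c ≠ '?') :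
    pvBGo (c :: t) = c :: pvBGo t := by
  simp [pvBGo, hc, hq]

-- A's in-single-quote mode equals B's literal scan: while in_single, A copies the literal
-- (body and closing quote) verbatim and resumes outside, or copies the rest if unterminated.
theorem pvAGo_true (n : Nat) : ∀ (r : List Char), r.length ≤ n →
    pvAGo r true = (match pvScanLit r with
      | some (b, rest) => b ++ pvAGo rest false
      | none => r) := by
  induction n with
  | zero =>
    intro r hr
    have : r = [] := List.eq_nil_of_length_eq_zero (Nat.le_zero.mp hr)
    subst this; simp [a_nil, pvScanLit]
  | succ n ih =>
    intro r hr
    cases r with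
    | nil => simp [a_nil, pvScanLit]
    | cons c t =>
      by_cases hc : c = '\''
      · subst hc
        cases t with
        | nil => simp [a_true_q0, a_nil, scan_q0]
        | cons c2 r2 =>
          by_cases hc2 : c2 = '\''
          · subst hc2
            have ht : r2.length ≤ n := by simp at hr ⊢; omega
            rw [a_true_qq, scan_qq, ih r2 ht]
            cases hs : pvScanLit r2 with
            | none => simp
            | some p => cases p with | mk b rest => simp
          · rw [a_true_q1 c2 r2 hc2, scan_q1 c2 r2 hc2]
            simp
      · have ht : t.length ≤ n := by simp at hr; omega
        rw [a_true_other c t hc, scan_other c t hc, ih t ht]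
        cases hs : pvScanLit t with
        | none => simp
        | some p => cases p with | mk b rest => simp

theorem pvAGo_eq_pvBGo (n : Nat) : ∀ (l : List Char), l.length ≤ n →
    pvAGo l false = pvBGo l := by
  induction n with
  | zero =>
    intro l hl
    have : l = [] := List.eq_nil_of_length_eq_zero (Nat.le_zero.mp hl)
    subst this; simp [a_nil, b_nil]
  | succ n ih =>
    intro l hl
    cases l with
    | nil => simp [a_nil, b_nil]
    | cons c t =>
      have ht : t.length ≤ n := by simp at hl; omega
      by_cases hc : c = '\''
      · subst hc
        rw [a_false_q, pvAGo_true t.length t (le_refl _)]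
        cases hs : pvScanLit t with
        | none => rw [b_q_none t hs]
        | some p =>
          cases p with
          | mk b rest =>
            have hrest : rest.length ≤ n := le_trans (pvScanLit_le t b rest hs) ht
            rw [b_q_some t b rest hs]
            simp [ih rest hrest]
      · by_cases hq : c = '?'
        · subst hq; rw [a_false_qm, b_qm, ih t ht]
        · rw [a_false_other c t hc hq, b_other c t hc hq, ih t ht]

-- ===== VERDICT (by name: the statement is the Claim_ definition above) =====
theorem qmarks_to_percent_s_spec : Claim_equal_qmarks_to_percent_s := by
  intro sql _
  unfold Spec_qmarks_to_percent_s qmarks_to_percent_s qmarks_to_percent_s_alt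
  rw [pvAGo_eq_pvBGo sql.toList.length sql.toList (le_refl _)]
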